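-- pv_equiv track=rewrite | github.com/srcoulombe/etf_comparer | src/utils.py | annotate_holdings
-- ===== SOURCE A (Python) =====
-- from typing import Mapping, List, Tuple, Callable, Union, Iterable, Any
--
-- def annotate_holdings(query_output: Mapping[str, Mapping[str, Mapping]]) -> Mapping[str, str]:
--     """Returns a dictionary mapping each holding held by >= 1 ETF in `query_output`
--     to a string of length = `len(query_output)`. These strings (annotations) are comprised of
--     `1`s and `0`s such that `annotations[i] == '1'` if the corresponding holding was held by
--     ETF `i` and `'0'` otherwise.
--
--     Parameters
--     ----------
--     query_output : Mapping[str, Mapping[str, Mapping]]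
--         Dictionary mapping an ETF ticker (strings) to a sub-dictionary
--         mapping the ETF's holdings (strings) to metadata (e.g. the holding's weight
--         w.r.t. the ETF).
--         See the documentation for the `get_holdings_and_weights_for_etfs` method from
--         `src.dbms.SQLDatabaseClient` or `src.dbms.TinyDBDatabaseClient`.
--
--     Returns
--     -------
--     Mapping[str, str]
--         A dictionary mapping a holding ticker (string) to an annotation string
--         whose `ith` character indicates whether the `ith` ETF held the corresponding holding
--         (`'1'`) or not (`'0'`).
--
--     Examples
--     --------
--     >>> sample = {"etf1": {"tickerA": {"weight": 0.5}, "tickerB": {"weight": 0.5}}, "etf2": {"tickerC": {"weight": 1.0}}}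
--     >>> out = annotate_holdings(sample)
--     >>> assert out == {"tickerA": '10', "tickerB": '10', "tickerC": '01'}
--     >>> sample = {"etf1": {"tickerA": {"weight": 0.5}, "tickerB": {"weight": 0.5}}, "etf2": {"tickerC": {"weight": 1.0}}, "etf3": {"tickerA": {"weight": 0.9}, "tickerB": {"weight": 0.05}, "tickerD": {"weight": 0.05}}}
--     >>> out = annotate_holdings(sample)
--     >>> assert out == {'tickerA': '101', 'tickerB': '101', 'tickerC': '010', 'tickerD': '001'}
--
--     """
--     all_holdings_with_annotations: Mapping[str, tuple] = dict()
--     # loop over all ETFs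
--     for i, (etf, etf_holdings_dict) in enumerate(query_output.items()):
--         # loop over each holding in the current ETF
--         for holding in etf_holdings_dict.keys():
--             current_annotation = all_holdings_with_annotations.get(
--                 holding,
--                 [0]*len(query_output)
--             )
--             current_annotation[i] = 1
--             all_holdings_with_annotations[holding] = current_annotation
--     return {
--         key: ''.join(map(str, annotation))
--         for key, annotation in
--         all_holdings_with_annotations.items()
--     }
-- ===== SOURCE B (Python) =====
-- def annotate_holdings(query_output):
--     # Pass 1: collect every holding in first-appearance order (dict as ordered set).
--     holdings = {}
--     for etf_holdings_dict in query_output.values():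
--         for holding in etf_holdings_dict:
--             holdings[holding] = None
--     # Pass 2: for each holding, build its annotation by a membership test per ETF.
--     return {
--         holding: ''.join(
--             '1' if holding in etf_holdings_dict else '0'
--             for etf_holdings_dict in query_output.values()
--         )
--         for holding in holdings
--     }
-- ===== Notes on version B (the rewrite author's own statement) =====
-- stated objective: alternative
-- what changed: B replaces A's single pass with per-holding mutable 0/1 vectors (get-default, in-place index assignment, re-insert) by two transposed passes: first collect the distinct holdings in first-appearance order, then for each holding build its string directly by a membership test over the ETFs in order.
import Mathlib
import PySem

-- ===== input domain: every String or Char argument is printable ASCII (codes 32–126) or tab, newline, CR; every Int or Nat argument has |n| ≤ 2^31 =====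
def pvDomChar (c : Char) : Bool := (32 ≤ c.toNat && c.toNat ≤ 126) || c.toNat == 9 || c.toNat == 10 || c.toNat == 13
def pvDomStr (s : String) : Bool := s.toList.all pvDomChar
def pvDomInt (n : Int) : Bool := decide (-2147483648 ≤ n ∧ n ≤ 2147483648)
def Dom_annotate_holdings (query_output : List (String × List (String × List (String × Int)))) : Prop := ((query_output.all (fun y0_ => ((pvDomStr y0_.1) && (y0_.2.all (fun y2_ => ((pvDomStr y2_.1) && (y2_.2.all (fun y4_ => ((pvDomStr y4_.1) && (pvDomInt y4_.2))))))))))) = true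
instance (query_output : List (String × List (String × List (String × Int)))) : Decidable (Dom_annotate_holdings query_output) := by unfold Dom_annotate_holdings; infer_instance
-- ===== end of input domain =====

-- B builds the same dict by two transposed passes (collect holdings, then one membership test
-- per ETF per holding) instead of A's per-holding mutable 0/1 vectors; same cost, no speed claim.

-- ===== PORT A =====
-- A: one pass over enumerate(query_output.items()); per holding, get-or-default a 0-vector of
-- length len(query_output), set index i to 1 in place, re-insert; finally join each vector.
def annotate_holdings (query_output : List (String × List (String × List (String × Int)))) : List (String × String) :=
  let n := query_output.length
  let d : PySem.Dict String (List Int) :=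
    (PySem.List.enumerate query_output 0).foldl
      (fun d ip =>
        ip.2.2.foldl
          (fun d hp =>
            d.insert hp.1 (PySem.List.pySetD (d.getD hp.1 (List.replicate n (0 : Int))) ip.1 1))
          d)
      PySem.Dict.empty
  d.items.map (fun p => (p.1, PySem.Str.join "" (p.2.map PySem.Int.toStr)))

-- ===== PORT B =====
-- B: pass 1 collects the distinct holdings in first-appearance order (dict-of-None = ordered set);
-- pass 2 builds each holding's string by testing membership in each ETF's holdings dict in order.
def annotate_holdings_alt (query_output : List (String × List (String × List (String × Int)))) : List (String × String) :=
  let holdings : PySem.Set String :=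
    query_output.foldl
      (fun s p => p.2.foldl (fun s hp => PySem.Set.add s hp.1) s)
      PySem.Set.empty
  holdings.map (fun h =>
    (h, PySem.Str.join "" (query_output.map
          (fun p => if (PySem.Dict.mk p.2).contains h then "1" else "0"))))

-- ===== PRECONDITION & SPEC =====
def Spec_annotate_holdings (query_output : List (String × List (String × List (String × Int)))) (out : List (String × String)) : Prop := out = annotate_holdings_alt query_output
instance (query_output : List (String × List (String × List (String × Int)))) (out : List (String × String)) : Decidable (Spec_annotate_holdings query_output out) := by unfold Spec_annotate_holdings; infer_instance

-- ===== CLAIM (what is proved, stated in full; the proofs are below) =====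
def Claim_equal_annotate_holdings : Prop := ∀ (query_output : List (String × List (String × List (String × Int)))), Dom_annotate_holdings query_output → Spec_annotate_holdings query_output (annotate_holdings query_output)

-- ===== LEMMAS AND PROOFS =====

-- the 0/1 entry B (resp. A, after rendering) produces for holding h and ETF entry p
def pvBit (h : String) (p : String × List (String × List (String × Int))) : Int :=
  if (PySem.Dict.mk p.2).contains h then 1 else 0

-- A's in-place bit-setting loop, abstracted to the vector of one holding h
def pvApplyBits (h : String) : List (String × List (String × List (String × Int))) → Nat → List Int → List Int
  | [], _, v => v
  | p :: rest, s, v => pvApplyBits h rest (s + 1) (if (PySem.Dict.mk p.2).contains h then v.set s 1 else v)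

-- Python 'h in etf_holdings_dict' as membership in the key list
theorem pv_contains_iff {a : Type} (l : List (String × a)) (h : String) :
    (PySem.Dict.mk l).contains h = true ↔ h ∈ l.map Prod.fst := by
  rw [PySem.Dict.contains_iff_mem_keys]; simp [PySem.Dict.keys_mk]

-- inner loop of A: effect on the stored vector of h
theorem pv_inner_getD (hs : List (String × List (String × Int)))
    (d : PySem.Dict String (List Int)) (m : Nat) (h : String) (v0 : List Int) :
    (hs.foldl (fun d hp => d.insert hp.1 (PySem.List.pySetD (d.getD hp.1 v0) (m : Int) 1)) d).getD h v0
      = if h ∈ hs.map Prod.fst then (d.getD h v0).set m 1 else d.getD h v0 := by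
  induction hs generalizing d with
  | nil => simp
  | cons hp rest ih =>
    rw [List.foldl_cons, ih]
    by_cases h2 : h = hp.1 <;> by_cases h1 : h ∈ rest.map Prod.fst <;>
      simp [h1, h2, PySem.Dict.getD_insert, PySem.List.pySetD_natCast, List.set_set]

-- outer loop of A: the stored vector of h is pvApplyBits applied to its start value
theorem pv_outer_getD (l : List (String × List (String × List (String × Int))))
    (s : Nat) (d : PySem.Dict String (List Int)) (h : String) (v0 : List Int) :
    ((PySem.List.enumerate l (s : Int)).foldl
        (fun d ip => ip.2.2.foldl
          (fun d hp => d.insert hp.1 (PySem.List.pySetD (d.getD hp.1 v0) ip.1 1)) d) d).getD h v0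
      = pvApplyBits h l s (d.getD h v0) := by
  induction l generalizing s d with
  | nil => simp [pvApplyBits]
  | cons p rest ih =>
    rw [PySem.List.enumerate_cons]
    have hc : ((s : Int) + 1) = ((s + 1 : Nat) : Int) := by push_cast; ring
    rw [List.foldl_cons, hc, ih, pv_inner_getD]
    by_cases hmem : h ∈ p.2.map Prod.fst
    · rw [if_pos hmem]
      have hc2 : (PySem.Dict.mk p.2).contains h = true := (pv_contains_iff _ _).mpr hmem
      simp [pvApplyBits, hc2]
    · rw [if_neg hmem]
      have hc2 : (PySem.Dict.mk p.2).contains h = false := by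
        rw [Bool.eq_false_iff]
        exact fun hx => hmem ((pv_contains_iff _ _).mp hx)
      simp [pvApplyBits, hc2]

-- closed form of pvApplyBits on an all-zero tail
theorem pv_applyBits_closed (h : String) (l : List (String × List (String × List (String × Int))))
    (pre : List Int) (m : Nat) (hm : l.length ≤ m) :
    pvApplyBits h l pre.length (pre ++ List.replicate m 0)
      = pre ++ l.map (pvBit h) ++ List.replicate (m - l.length) 0 := by
  induction l generalizing pre m with
  | nil => simp [pvApplyBits]
  | cons p rest ih =>
    obtain ⟨m', rfl⟩ : ∃ m', m = m' + 1 := ⟨m - 1, by simp at hm; omega⟩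
    have hm' : rest.length ≤ m' := by simp at hm; omega
    have key : ∀ b : Int,
        pvApplyBits h rest (pre ++ [b]).length ((pre ++ [b]) ++ List.replicate m' 0)
          = (pre ++ [b]) ++ rest.map (pvBit h) ++ List.replicate (m' - rest.length) 0 :=
      fun b => ih (pre ++ [b]) m' hm'
    simp only [pvApplyBits, List.replicate_succ]
    by_cases hc : (PySem.Dict.mk p.2).contains h
    · have h1 : (pre ++ 0 :: List.replicate m' 0).set pre.length (1 : Int)
          = (pre ++ [(1 : Int)]) ++ List.replicate m' 0 := by
        rw [List.set_append]; simp
      have h2 := key 1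
      simp only [List.length_append, List.length_singleton] at h2
      rw [if_pos hc, h1, h2]
      simp [pvBit, hc]
    · have h1 : pre ++ (0 : Int) :: List.replicate m' 0
          = (pre ++ [(0 : Int)]) ++ List.replicate m' 0 := by simp
      have h2 := key 0
      simp only [List.length_append, List.length_singleton] at h2
      rw [if_neg hc, h1, h2]
      simp [pvBit, hc]

-- keys of A's dict = B's holdings set
theorem pv_keys (l : List (String × List (String × List (String × Int))))
    (s : Nat) (d : PySem.Dict String (List Int)) (v0 : List Int) :
    ((PySem.List.enumerate l (s : Int)).foldl
        (fun d ip => ip.2.2.foldl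
          (fun d hp => d.insert hp.1 (PySem.List.pySetD (d.getD hp.1 v0) ip.1 1)) d) d).keys
      = l.foldl (fun ks p => p.2.foldl (fun ks hp => PySem.Set.add ks hp.1) ks) d.keys := by
  induction l generalizing s d with
  | nil => simp
  | cons p rest ih =>
    rw [PySem.List.enumerate_cons]
    have hc : ((s : Int) + 1) = ((s + 1 : Nat) : Int) := by push_cast; ring
    simp only [List.foldl_cons, hc, ih]
    rw [PySem.Dict.keys_foldl_insert_key (key := Prod.fst), ← PySem.Set.update_map_eq_foldl_add]

theorem pv_nodup_keys (l : List (String × List (String × List (String × Int))))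
    (s : Nat) (d : PySem.Dict String (List Int)) (v0 : List Int) (hd : d.keys.Nodup) :
    ((PySem.List.enumerate l (s : Int)).foldl
        (fun d ip => ip.2.2.foldl
          (fun d hp => d.insert hp.1 (PySem.List.pySetD (d.getD hp.1 v0) ip.1 1)) d) d).keys.Nodup := by
  induction l generalizing s d with
  | nil => simpa
  | cons p rest ih =>
    rw [PySem.List.enumerate_cons]
    have hc : ((s : Int) + 1) = ((s + 1 : Nat) : Int) := by push_cast; ring
    simp only [List.foldl_cons, hc]
    exact ih _ _ (PySem.Dict.nodup_keys_foldl_insert_key _ Prod.fst _ _ hd)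

-- ===== VERDICT (by name: the statement is the Claim_ definition above) =====
theorem annotate_holdings_spec : Claim_equal_annotate_holdings := by
  intro q _
  unfold Spec_annotate_holdings annotate_holdings annotate_holdings_alt
  dsimp only
  have hnd := pv_nodup_keys q 0 PySem.Dict.empty (List.replicate q.length 0) (by simp)
  have hk := pv_keys q 0 PySem.Dict.empty (List.replicate q.length 0)
  simp only [Nat.cast_zero] at hnd hk
  rw [PySem.Dict.items_eq_map_keys _ hnd (List.replicate q.length 0), List.map_map, hk,
    PySem.Dict.keys_empty]
  refine List.map_congr_left (fun k _ => ?_)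
  have hg := pv_outer_getD q 0 PySem.Dict.empty k (List.replicate q.length 0)
  simp only [Nat.cast_zero, PySem.Dict.getD_empty] at hg
  have hcl := pv_applyBits_closed k q [] q.length le_rfl
  simp only [List.length_nil, List.nil_append, Nat.sub_self, List.replicate_zero,
    List.append_nil] at hcl
  simp only [Function.comp, hg, hcl]
  rw [List.map_map]
  refine congrArg (fun s => (k, PySem.Str.join "" s)) (List.map_congr_left fun p _ => ?_)
  simp only [Function.comp_apply, pvBit]
  by_cases hc : (PySem.Dict.mk p.2).contains k = true
  · rw [if_pos hc, if_pos hc]; rfl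
  · rw [if_neg hc, if_neg hc]; rfl
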